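-- pv_equiv track=rewrite | github.com/yakir1991/lora-lite-phy | debug_sync_detailed.py | apply_gray_mapping
-- ===== SOURCE A (Python) =====
-- def apply_gray_mapping(symbols):
--     """Apply Gray code to binary mapping"""
--     def gray_to_binary(gray):
--         binary = gray
--         while gray:
--             gray >>= 1
--             binary ^= gray
--         return binary
--
--     return [gray_to_binary(s) for s in symbols]
-- ===== SOURCE B (Python) =====
-- def apply_gray_mapping(symbols):
--     """Apply Gray code to binary mapping (logarithmic shift-doubling decode)"""
--     def decode(gray):
--         binary = gray
--         shift = 1
--         while gray >> shift:
--             binary ^= binary >> shift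
--             shift <<= 1
--         return binary
--
--     return [decode(s) for s in symbols]
-- ===== Notes on version B (the rewrite author's own statement) =====
-- stated objective: alternative
-- what changed: A decodes each symbol by XOR-ing every successive right-shift of the word into an accumulator (one loop step per bit); B uses the shift-doubling Gray decode (binary ^= binary >> shift; shift <<= 1), logarithmically many XOR steps per symbol, with a loop state (binary, shift) over a fixed gray instead of A's shrinking gray.
import Mathlib
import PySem

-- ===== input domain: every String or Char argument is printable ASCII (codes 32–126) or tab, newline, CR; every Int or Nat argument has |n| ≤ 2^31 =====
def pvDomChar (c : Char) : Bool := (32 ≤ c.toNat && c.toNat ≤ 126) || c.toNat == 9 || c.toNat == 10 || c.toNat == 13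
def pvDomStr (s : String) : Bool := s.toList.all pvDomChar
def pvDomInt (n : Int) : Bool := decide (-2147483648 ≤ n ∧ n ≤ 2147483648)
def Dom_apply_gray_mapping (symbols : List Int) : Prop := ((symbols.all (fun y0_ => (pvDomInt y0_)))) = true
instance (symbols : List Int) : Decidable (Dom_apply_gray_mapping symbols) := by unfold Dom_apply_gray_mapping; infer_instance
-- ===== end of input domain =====

-- B replaces A's per-symbol whole-word XOR-accumulation loop (one step per bit) by the
-- shift-doubling Gray decode (binary ^= binary >> shift; shift <<= 1) — logarithmically
-- many XOR steps per symbol (objective: alternative; no speed claim).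


-- termination helper for port A (cited in decreasing_by)
theorem pvShiftToNat_lt (g : Int) (h : 0 < g) : (g >>> (1 : Int)).toNat < g.toNat := by
  rcases g with n | n
  · rw [show ((Int.ofNat n) >>> (1 : Int)) = ((n >>> 1 : Nat) : Int) from Int.shiftRight_natCast n 1]
    simp only [Int.toNat_natCast, Int.ofNat_eq_natCast] at *
    have : 0 < n := by exact_mod_cast h
    simp [Nat.shiftRight_one]
    omega
  · exact absurd h (by exact not_lt.mpr (Int.negSucc_lt_zero n).le)

-- termination helper for port B (cited in decreasing_by): shift doubles, g >>> shift shrinks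
theorem pvDoubleShift_lt (g shift : Int) (hs : 0 < shift) (hg : 0 < g >>> shift) :
    (g >>> (shift + shift)).toNat < (g >>> shift).toNat := by
  obtain ⟨s, rfl⟩ := Int.eq_ofNat_of_zero_le hs.le
  rcases g with n | n
  · rw [show ((Int.ofNat n) >>> ((s : Int) + (s : Int))) = ((n >>> (s + s) : Nat) : Int) by
        rw [← Int.natCast_add]; exact Int.shiftRight_natCast n (s + s),
      show ((Int.ofNat n) >>> (s : Int)) = ((n >>> s : Nat) : Int) from Int.shiftRight_natCast n s] at *
    have hns : 0 < n >>> s := by exact_mod_cast hg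
    have hs' : 0 < s := by exact_mod_cast hs
    rw [Nat.shiftRight_add, Int.toNat_natCast, Int.toNat_natCast]
    rw [Nat.shiftRight_eq_div_pow]
    have h2 : 2 ≤ 2 ^ s := by
      calc 2 = 2 ^ 1 := by norm_num
      _ ≤ 2 ^ s := Nat.pow_le_pow_right (by norm_num) hs'
    exact Nat.div_lt_self hns (by omega)
  · rw [Int.shiftRight_negSucc n s] at hg
    exact absurd hg (by exact not_lt.mpr (Int.negSucc_lt_zero _).le)

-- ===== PORT A =====
-- Python's `while gray:` with `gray >>= 1; binary ^= gray`.  On negative gray the Python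
-- loop never terminates (excluded by Pre_); the port returns the accumulator there.
def grayToBinary (gray binary : Int) : Int :=
  if h : 0 < gray then
    grayToBinary (gray >>> (1 : Int)) (Int.xor binary (gray >>> (1 : Int)))
  else binary
termination_by gray.toNat
decreasing_by exact pvShiftToNat_lt gray h

def apply_gray_mapping (symbols : List Int) : List Int :=
  symbols.map (fun s => grayToBinary s s)

-- ===== PORT B =====
-- Source B's loop: `while gray >> shift: binary ^= binary >> shift; shift <<= 1`.
-- gray is fixed; binary and shift evolve.  The extra `0 < shift` conjunct only makes the
-- recursion total (shift is 1,2,4,… on every call Python makes); on negative gray the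
-- Python loop never terminates (excluded by Pre_) and the port returns the accumulator.
def grayStep (gray binary shift : Int) : Int :=
  if h : 0 < shift ∧ 0 < gray >>> shift then
    grayStep gray (Int.xor binary (binary >>> shift)) (shift + shift)
  else binary
termination_by (gray >>> shift).toNat
decreasing_by exact pvDoubleShift_lt gray shift h.1 h.2

def apply_gray_mapping_alt (symbols : List Int) : List Int :=
  symbols.map (fun s => grayStep s s 1)

-- ===== PRECONDITION & SPEC =====
-- Pre_ excludes negative symbols: there Python A's `while gray:` loop never terminates
-- (gray >>= 1 stays -1), so A returns on exactly the all-nonnegative lists.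
def Pre_apply_gray_mapping (symbols : List Int) : Prop := ∀ s ∈ symbols, 0 ≤ s
instance (symbols : List Int) : Decidable (Pre_apply_gray_mapping symbols) := by unfold Pre_apply_gray_mapping; infer_instance
def pvWitness_apply_gray_mapping : List Int := [0, 1, 2, 3, 6, 11]

def Spec_apply_gray_mapping (symbols : List Int) (out : List Int) : Prop := out = apply_gray_mapping_alt symbols
instance (symbols : List Int) (out : List Int) : Decidable (Spec_apply_gray_mapping symbols out) := by unfold Spec_apply_gray_mapping; infer_instance

-- ===== CLAIM (what is proved, stated in full; the proofs are below) =====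
def Claim_equal_apply_gray_mapping : Prop := ∀ (symbols : List Int), Dom_apply_gray_mapping symbols → Pre_apply_gray_mapping symbols → Spec_apply_gray_mapping symbols (apply_gray_mapping symbols)

-- ===== LEMMAS AND PROOFS =====

-- Nat-level spec: the cumulative XOR of all right-shifts of n.
def grayXorSpec (n : Nat) : Nat :=
  if h : n = 0 then 0 else n ^^^ grayXorSpec (n >>> 1)
termination_by n
decreasing_by simp [Nat.shiftRight_one]; omega

theorem grayXorSpec_zero : grayXorSpec 0 = 0 := by simp [grayXorSpec]

theorem grayXorSpec_pos (n : Nat) (h : n ≠ 0) : grayXorSpec n = n ^^^ grayXorSpec (n >>> 1) := by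
  rw [grayXorSpec]; simp [h]

-- casts used throughout
theorem cast_shift (n s : Nat) : ((n : Int) >>> (s : Int)) = ((n >>> s : Nat) : Int) :=
  Int.shiftRight_natCast n s

theorem cast_xor (a b : Nat) : Int.xor (a : Int) (b : Int) = ((a ^^^ b : Nat) : Int) := by
  simp [Int.xor]

-- ---- A-side characterisation ----
theorem grayToBinary_cast (n : Nat) : ∀ c : Nat,
    grayToBinary (n : Int) (c : Int) = ((c ^^^ (grayXorSpec n ^^^ n) : Nat) : Int) := by
  induction n using Nat.strong_induction_on with
  | _ n ih =>
    intro c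
    by_cases h : n = 0
    · subst h
      rw [grayToBinary]
      simp [grayXorSpec_zero]
    · rw [grayToBinary]
      have hpos : (0 : Int) < (n : Int) := by exact_mod_cast Nat.pos_of_ne_zero h
      rw [dif_pos hpos, show ((n : Int) >>> (1 : Int)) = ((n >>> 1 : Nat) : Int) from Int.shiftRight_natCast n 1, cast_xor]
      rw [ih (n >>> 1) (by simp [Nat.shiftRight_one]; omega) (c ^^^ n >>> 1)]
      congr 1
      rw [grayXorSpec_pos n h, Nat.xor_assoc, Nat.xor_assoc]
      congr 1
      have e1 : ∀ a b : Nat, a ^^^ (b ^^^ a) = b := fun a b => by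
        rw [Nat.xor_comm b a, ← Nat.xor_assoc]; simp
      rw [e1, e1]

-- ---- B-side: partial XOR sums  F2 n t s = (n>>>t) ^^^ (n>>>(t+1)) ^^^ … ^^^ (n>>>(t+s-1)) ----
def F2 (n t s : Nat) : Nat :=
  match s with
  | 0 => 0
  | s + 1 => F2 n t s ^^^ (n >>> (t + s))

theorem F2_zero_n (t s : Nat) : F2 0 t s = 0 := by
  induction s with
  | zero => rfl
  | succ s ih => simp [F2, ih, Nat.zero_shiftRight]

theorem F2_split (n t a : Nat) : ∀ b, F2 n t (a + b) = F2 n t a ^^^ F2 n (t + a) b := by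
  intro b
  induction b with
  | zero => simp [F2]
  | succ b ih =>
    show F2 n t (a + b) ^^^ (n >>> (t + (a + b))) = _
    rw [ih, Nat.xor_assoc]
    simp [F2, Nat.add_assoc]

theorem F2_shift (n s : Nat) : ∀ t, (F2 n 0 s) >>> t = F2 n t s := by
  intro t
  induction s with
  | zero => simp [F2, Nat.zero_shiftRight]
  | succ s ih =>
    show (F2 n 0 s ^^^ (n >>> (0 + s))) >>> t = F2 n t s ^^^ (n >>> (t + s))
    rw [Nat.shiftRight_xor_distrib, ih, Nat.zero_add, ← Nat.shiftRight_add, Nat.add_comm s t]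

theorem F2_one (n : Nat) : F2 n 0 1 = n := by simp [F2]

theorem F2_base_shift (n : Nat) : ∀ s, F2 n 1 s = F2 (n >>> 1) 0 s := by
  intro s
  induction s with
  | zero => rfl
  | succ s ih =>
    show F2 n 1 s ^^^ (n >>> (1 + s)) = F2 (n >>> 1) 0 s ^^^ ((n >>> 1) >>> (0 + s))
    rw [ih, Nat.shiftRight_add, Nat.zero_add]

theorem F2_complete (n : Nat) : ∀ s, n >>> s = 0 → F2 n 0 s = grayXorSpec n := by
  induction n using Nat.strong_induction_on with
  | _ n ih =>
    intro s hs
    by_cases h : n = 0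
    · subst h; rw [F2_zero_n, grayXorSpec_zero]
    · have hs0 : s ≠ 0 := by
        intro h0; subst h0; exact h hs
      obtain ⟨t, rfl⟩ := Nat.exists_eq_succ_of_ne_zero hs0
      rw [show t.succ = 1 + t from by omega, F2_split n 0 1 t, F2_one, F2_base_shift]
      have hlt : n >>> 1 < n := by
        rw [Nat.shiftRight_one]; exact Nat.div_lt_self (Nat.pos_of_ne_zero h) (by norm_num)
      have hsh : (n >>> 1) >>> t = 0 := by
        rw [← Nat.shiftRight_add, Nat.add_comm 1 t]; exact hs
      rw [ih (n >>> 1) hlt t hsh, grayXorSpec_pos n h]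

-- B's loop computes grayXorSpec, by strong induction on the remaining high bits n >>> s
theorem grayStep_cast (k : Nat) : ∀ n s : Nat, 0 < s → n >>> s = k →
    grayStep (n : Int) ((F2 n 0 s : Nat) : Int) ((s : Nat) : Int) = ((grayXorSpec n : Nat) : Int) := by
  induction k using Nat.strong_induction_on with
  | _ k ih =>
    intro n s hs hk
    rw [grayStep]
    by_cases hz : n >>> s = 0
    · rw [dif_neg (by
        rintro ⟨-, h2⟩
        rw [cast_shift n s, hz] at h2
        exact absurd h2 (by norm_num))]
      rw [F2_complete n s hz]
    · rw [dif_pos ⟨by exact_mod_cast hs, by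
        rw [cast_shift n s]; exact_mod_cast Nat.pos_of_ne_zero hz⟩]
      rw [cast_shift (F2 n 0 s) s, cast_xor, F2_shift n s s,
        show F2 n 0 s ^^^ F2 n s s = F2 n 0 (s + s) by
          rw [F2_split n 0 s s, Nat.zero_add],
        show ((s : Nat) : Int) + ((s : Nat) : Int) = (((s + s : Nat)) : Int) by push_cast; ring]
      subst hk
      have hlt : n >>> (s + s) < n >>> s := by
        rw [Nat.shiftRight_add]
        rw [Nat.shiftRight_eq_div_pow]
        have h2 : 2 ≤ 2 ^ s := by
          calc 2 = 2 ^ 1 := by norm_num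
          _ ≤ 2 ^ s := Nat.pow_le_pow_right (by norm_num) hs
        exact Nat.div_lt_self (Nat.pos_of_ne_zero hz) (by omega)
      exact ih (n >>> (s + s)) hlt n (s + s) (by omega) rfl

theorem per_symbol (s : Int) (hs : 0 ≤ s) : grayToBinary s s = grayStep s s 1 := by
  obtain ⟨n, rfl⟩ := Int.eq_ofNat_of_zero_le hs
  have hx : n ^^^ (grayXorSpec n ^^^ n) = grayXorSpec n := by
    rw [Nat.xor_comm (grayXorSpec n) n, ← Nat.xor_assoc]; simp
  have h1 := grayStep_cast (n >>> 1) n 1 (by norm_num) rfl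
  rw [F2_one] at h1
  rw [grayToBinary_cast n n, hx]
  exact_mod_cast h1.symm

-- ===== VERDICT (by name: the statement is the Claim_ definition above) =====
theorem apply_gray_mapping_spec : Claim_equal_apply_gray_mapping := by
  intro symbols _ hpre
  unfold Spec_apply_gray_mapping apply_gray_mapping apply_gray_mapping_alt
  apply List.map_congr_left
  intro s hs
  exact per_symbol s (hpre s hs)
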